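-- pv_equiv track=rewrite | github.com/meistro57/Transcripto | transcripto.py | map_speakers_to_letters
-- ===== SOURCE A (Python) =====
-- from typing import Dict, Any, List
--
-- def map_speakers_to_letters(segments: List[Dict[str, Any]]) -> List[Dict[str, Any]]:
--     """
--     Map SPEAKER_00/SPEAKER_01/etc to Speaker A/Speaker B based on first appearance.
--     """
--     mapping: Dict[str, str] = {}
--     next_letter = ord("A")
--
--     for seg in segments:
--         raw = seg.get("speaker", "Unknown")
--         if raw not in mapping:
--             mapping[raw] = f"Speaker {chr(next_letter)}"
--             next_letter += 1
--         seg["speaker_label"] = mapping[raw]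
--
--     return segments
-- ===== SOURCE B (Python) =====
-- def map_speakers_to_letters(segments):
--     """
--     Map SPEAKER_00/SPEAKER_01/etc to Speaker A/Speaker B based on first appearance.
--     Two-pass version: build the full label table first, then label branch-free.
--     """
--     uniques = dict.fromkeys(seg.get("speaker", "Unknown") for seg in segments)
--     mapping = {sp: f"Speaker {chr(ord('A') + i)}" for i, sp in enumerate(uniques)}
--     for seg in segments:
--         seg["speaker_label"] = mapping[seg.get("speaker", "Unknown")]
--     return segments
-- ===== Notes on version B (the rewrite author's own statement) =====
-- stated objective: alternative
-- what changed: B separates table construction from labeling: it first derives the ordered unique speakers with dict.fromkeys, builds the full speaker->letter mapping via enumerate, then labels all segments in a second branch-free pass, instead of A's single interleaved pass with a conditional insert.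
import Mathlib
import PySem

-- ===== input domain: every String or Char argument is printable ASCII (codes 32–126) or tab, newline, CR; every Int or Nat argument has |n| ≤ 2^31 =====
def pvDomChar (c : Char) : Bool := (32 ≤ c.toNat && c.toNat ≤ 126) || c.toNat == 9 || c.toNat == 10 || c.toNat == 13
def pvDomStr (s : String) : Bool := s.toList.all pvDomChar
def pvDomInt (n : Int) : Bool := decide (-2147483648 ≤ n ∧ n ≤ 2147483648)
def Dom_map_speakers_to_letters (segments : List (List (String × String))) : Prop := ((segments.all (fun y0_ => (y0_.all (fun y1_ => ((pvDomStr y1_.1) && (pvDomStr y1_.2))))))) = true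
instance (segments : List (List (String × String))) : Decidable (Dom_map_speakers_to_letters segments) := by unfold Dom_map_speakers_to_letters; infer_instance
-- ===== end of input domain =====

-- B builds the whole first-appearance label table first, then labels every segment in a
-- branch-free second pass (A interleaves table construction and labeling in one pass with a
-- conditional); objective: alternative decomposition, same return value.  Both the Python A
-- and the Python B mutate the segment dicts in place; the equivalence proved here is about
-- the RETURN value (the ports are pure).

-- chr(n) for an int code point; exact for 0 ≤ n < 0x110000 (here n is always ≥ 65)
def pvChr (n : Int) : String := String.ofList [Char.ofNat n.toNat]

-- ===== PORT A =====
-- the for-loop of A, carrying (mapping, next_letter); list elements are rebuilt (pure port of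
-- the in-place update seg["speaker_label"] = mapping[raw])
def loopA (mapping : PySem.Dict String String) (next_letter : Int) :
    List (List (String × String)) → List (List (String × String))
  | [] => []
  | seg :: rest =>
    let raw := (PySem.Dict.mk seg).getD "speaker" "Unknown"
    if mapping.contains raw then
      ((PySem.Dict.mk seg).insert "speaker_label" (mapping.getD raw "")).items ::
        loopA mapping next_letter rest
    else
      let m' := mapping.insert raw ("Speaker " ++ pvChr next_letter)
      ((PySem.Dict.mk seg).insert "speaker_label" (m'.getD raw "")).items ::
        loopA m' (next_letter + 1) rest

def map_speakers_to_letters (segments : List (List (String × String))) : List (List (String × String)) :=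
  loopA PySem.Dict.empty 65 segments

-- ===== PORT B =====
-- dict.fromkeys(...) = ordered dedup = PySem.Set.ofList; then the mapping dict from enumerate;
-- then a branch-free map over the segments
def map_speakers_to_letters_alt (segments : List (List (String × String))) : List (List (String × String)) :=
  let uniques := PySem.Set.ofList (segments.map (fun seg => (PySem.Dict.mk seg).getD "speaker" "Unknown"))
  let mapping := (PySem.List.enumerate uniques).foldl
    (fun d p => d.insert p.2 ("Speaker " ++ pvChr (65 + p.1))) PySem.Dict.empty
  segments.map (fun seg =>
    ((PySem.Dict.mk seg).insert "speaker_label"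
      (mapping.getD ((PySem.Dict.mk seg).getD "speaker" "Unknown") "")).items)

-- ===== PRECONDITION & SPEC =====
def Spec_map_speakers_to_letters (segments : List (List (String × String))) (out : List (List (String × String))) : Prop := out = map_speakers_to_letters_alt segments
instance (segments : List (List (String × String))) (out : List (List (String × String))) : Decidable (Spec_map_speakers_to_letters segments out) := by unfold Spec_map_speakers_to_letters; infer_instance

-- ===== CLAIM (what is proved, stated in full; the proofs are below) =====
def Claim_equal_map_speakers_to_letters : Prop := ∀ (segments : List (List (String × String))), Dom_map_speakers_to_letters segments → Spec_map_speakers_to_letters segments (map_speakers_to_letters segments)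

-- ===== LEMMAS AND PROOFS =====

-- the speaker key of a segment
def segKey (seg : List (String × String)) : String := (PySem.Dict.mk seg).getD "speaker" "Unknown"

-- the label table built from an ordered list of distinct speakers
def buildMap (u : List String) : PySem.Dict String String :=
  (PySem.List.enumerate u).foldl (fun d p => d.insert p.2 ("Speaker " ++ pvChr (65 + p.1))) PySem.Dict.empty

theorem getD_fold_not_mem (u : List String) (r : String) (hr : r ∉ u) :
    ∀ (s : Int) (d : PySem.Dict String String),
    ((PySem.List.enumerate u s).foldl (fun d p => d.insert p.2 ("Speaker " ++ pvChr (65 + p.1))) d).getD r ""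
      = d.getD r "" := by
  induction u with
  | nil => intro s d; simp [PySem.List.enumerate_nil]
  | cons x t ih =>
    intro s d
    simp only [PySem.List.enumerate_cons, List.foldl_cons]
    rw [ih (List.not_mem_of_not_mem_cons hr)]
    rw [PySem.Dict.getD_insert, if_neg]
    intro h; subst h; exact hr List.mem_cons_self

theorem getD_fold_mem (u : List String) (r : String) (hnd : u.Nodup) (hr : r ∈ u) :
    ∀ (s : Int) (d : PySem.Dict String String),
    ((PySem.List.enumerate u s).foldl (fun d p => d.insert p.2 ("Speaker " ++ pvChr (65 + p.1))) d).getD r ""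
      = "Speaker " ++ pvChr (65 + (s + (u.idxOf r : Int))) := by
  induction u with
  | nil => exact absurd hr (List.not_mem_nil)
  | cons x t ih =>
    intro s d
    simp only [PySem.List.enumerate_cons, List.foldl_cons]
    by_cases hx : r = x
    · subst hx
      rw [getD_fold_not_mem t r (by simp at hnd; exact hnd.1) (s + 1)]
      rw [PySem.Dict.getD_insert_self]
      simp [List.idxOf_cons_self]
    · have hrt : r ∈ t := by cases hr with | head => exact absurd rfl hx | tail _ h => exact h
      rw [ih (by simp at hnd; exact hnd.2) hrt (s + 1)]
      have : (x :: t).idxOf r = t.idxOf r + 1 := List.idxOf_cons_ne _ (fun h => hx h.symm)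
      rw [this]; push_cast; ring_nf

theorem getD_buildMap (u : List String) (r : String) (hnd : u.Nodup) (hr : r ∈ u) :
    (buildMap u).getD r "" = "Speaker " ++ pvChr (65 + (u.idxOf r : Int)) := by
  unfold buildMap
  rw [getD_fold_mem u r hnd hr 0]
  norm_num

theorem keys_buildMap (u : List String) : (buildMap u).keys = PySem.Set.ofList u := by
  unfold buildMap
  rw [PySem.Dict.keys_foldl_insert_key (PySem.List.enumerate u) (·.2)
    (fun d p => "Speaker " ++ pvChr (65 + p.1)) PySem.Dict.empty]
  simp [PySem.List.map_snd_enumerate, PySem.Dict.keys_empty, PySem.Set.update_nil_left]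

theorem contains_buildMap (u : List String) (r : String) :
    (buildMap u).contains r = decide (r ∈ u) := by
  rw [PySem.Dict.contains_eq_decide_mem_keys, keys_buildMap]
  simp [PySem.Set.mem_ofList]

theorem buildMap_append_singleton (u : List String) (x : String) :
    buildMap (u ++ [x]) = (buildMap u).insert x ("Speaker " ++ pvChr (65 + (u.length : Int))) := by
  unfold buildMap
  rw [show PySem.List.enumerate (u ++ [x]) = PySem.List.enumerate u 0 ++ PySem.List.enumerate [x] (0 + u.length) from PySem.List.enumerate_append u [x] 0]
  rw [List.foldl_append]
  simp [PySem.List.enumerate_cons, PySem.List.enumerate_nil]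

theorem idxOf_prefix (u t : List String) (r : String) (hr : r ∈ u) :
    (u ++ t).idxOf r = u.idxOf r := by
  induction u with
  | nil => exact absurd hr (List.not_mem_nil)
  | cons x s ih =>
    by_cases hx : r = x
    · subst hx; simp [List.idxOf_cons_self]
    · have hrs : r ∈ s := by cases hr with | head => exact absurd rfl hx | tail _ h => exact h
      simp [List.idxOf_cons, ih hrs]

-- main invariant: processing rest with table buildMap u (u = distinct keys seen so far)
theorem loopA_eq (rest : List (List (String × String))) :
    ∀ (u : List String), u.Nodup →
    loopA (buildMap u) (65 + (u.length : Int)) rest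
      = rest.map (fun seg =>
          ((PySem.Dict.mk seg).insert "speaker_label"
            ((buildMap (PySem.Set.update u (rest.map segKey))).getD (segKey seg) "")).items) := by
  induction rest with
  | nil => intro u _; simp [loopA]
  | cons seg rest ih =>
    intro u hnd
    have hkey : (PySem.Dict.mk seg).getD "speaker" "Unknown" = segKey seg := rfl
    simp only [loopA, List.map_cons, hkey, PySem.Set.update_cons, List.map_cons]
    by_cases hmem : segKey seg ∈ u
    · rw [contains_buildMap u _]
      simp only [hmem, decide_true, if_true]
      rw [PySem.Set.add_of_mem hmem]
      rw [ih u hnd]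
      congr 1
      congr 2
      rw [getD_buildMap u _ hnd hmem]
      have hU : segKey seg ∈ PySem.Set.update u (rest.map segKey) := by
        rw [PySem.Set.mem_update]; exact Or.inl hmem
      rw [getD_buildMap _ _ (PySem.Set.nodup_update _ _ hnd) hU]
      rw [PySem.Set.update_eq_append_filter u (rest.map segKey)]
      rw [idxOf_prefix u _ _ hmem]
    · rw [contains_buildMap u _]
      simp only [hmem, decide_false, if_false, Bool.false_eq_true]
      rw [PySem.Set.add_of_not_mem hmem]
      rw [← buildMap_append_singleton u (segKey seg)]
      have hnd' : (u ++ [segKey seg]).Nodup := by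
        simp [List.nodup_append, hnd]
        exact fun a ha h => hmem (h ▸ ha)
      have hlen : 65 + (u.length : Int) + 1 = 65 + ((u ++ [segKey seg]).length : Int) := by
        simp; ring
      rw [hlen, ih (u ++ [segKey seg]) hnd']
      congr 1
      have hU : segKey seg ∈ PySem.Set.update (u ++ [segKey seg]) (rest.map segKey) := by
        rw [PySem.Set.mem_update]; exact Or.inl (by simp)
      congr 2
      rw [getD_buildMap _ _ hnd' (by simp : segKey seg ∈ u ++ [segKey seg])]
      rw [getD_buildMap _ _ (PySem.Set.nodup_update _ _ hnd') hU]
      rw [PySem.Set.update_eq_append_filter (u ++ [segKey seg]) (rest.map segKey)]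
      rw [idxOf_prefix _ _ _ (by simp : segKey seg ∈ u ++ [segKey seg])]

-- ===== VERDICT (by name: the statement is the Claim_ definition above) =====
theorem map_speakers_to_letters_spec : Claim_equal_map_speakers_to_letters := by
  intro segments _
  unfold Spec_map_speakers_to_letters map_speakers_to_letters map_speakers_to_letters_alt
  have h := loopA_eq segments [] List.nodup_nil
  simp only [PySem.Set.update_nil_left] at h
  have hb : buildMap [] = PySem.Dict.empty := rfl
  rw [hb] at h
  simpa [segKey, buildMap, PySem.Set.ofList] using h
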